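-- pv_equiv track=rewrite | github.com/TurtleTools/caretta | evaluation/benchmark_paper.py | get_core_indices
-- ===== SOURCE A (Python) =====
-- def get_core_indices(alignment):
--     indices = list()
--     for i in range(len(list(alignment.values())[0])):
--         full = True
--         for seq in alignment.values():
--             if seq[i] == "-":
--                 full = False
--                 break
--             else:
--                 pass
--         if full:
--             indices.append(i)
--         else:
--             continue
--     return indices
-- ===== SOURCE B (Python) =====
-- def get_core_indices(alignment):
--     seqs = list(alignment.values())
--     n = len(seqs[0])
--     gapped = set()
--     for seq in seqs:
--         for i in range(n):
--             if seq[i] == "-":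
--                 gapped.add(i)
--     return [i for i in range(n) if i not in gapped]
-- ===== Notes on version B (the rewrite author's own statement) =====
-- stated objective: alternative
-- what changed: B transposes the traversal: it loops sequence-outer/column-inner once, maintaining a set of gapped column indices, then emits range(n) filtered by that set, instead of A's per-column inner scan over all sequences with an early break.
-- outside the precondition, e.g. on get_core_indices({'a': '-', 'b': ''}): A returns [], B raises IndexError; on get_core_indices({}): A raises IndexError, B raises IndexError
import Mathlib
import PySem

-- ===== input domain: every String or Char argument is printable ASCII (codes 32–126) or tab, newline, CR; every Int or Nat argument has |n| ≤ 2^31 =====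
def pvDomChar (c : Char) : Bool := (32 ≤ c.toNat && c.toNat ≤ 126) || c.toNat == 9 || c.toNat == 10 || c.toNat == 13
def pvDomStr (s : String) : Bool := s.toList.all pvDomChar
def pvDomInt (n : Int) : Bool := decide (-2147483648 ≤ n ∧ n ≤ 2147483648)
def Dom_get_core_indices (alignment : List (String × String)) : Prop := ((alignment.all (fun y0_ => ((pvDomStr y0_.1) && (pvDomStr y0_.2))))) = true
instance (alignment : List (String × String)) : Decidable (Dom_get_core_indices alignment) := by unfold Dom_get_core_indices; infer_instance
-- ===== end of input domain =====

-- B replaces A's per-column scan over all sequences (with early break) by a single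
-- sequence-outer/column-inner pass that maintains a set of gapped column indices,
-- then filters range(n) by that set (objective: alternative decomposition, same cost).

-- ===== PORT A =====
-- len(list(alignment.values())[0]); on an empty dict Python raises IndexError — excluded by Pre_ (0 there is arbitrary)
def pvLenFirstA (vals : List String) : Int :=
  match vals with | [] => 0 | s :: _ => PySem.Str.len s

-- inner loop 'for seq in alignment.values(): if seq[i] == "-": full = False; break'
-- (on an out-of-range index Python raises IndexError — excluded by Pre_; 'false' there is arbitrary)
def pvFullA (vals : List String) (i : Int) : Bool :=
  match vals with
  | [] => true
  | seq :: rest =>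
    match PySem.Str.pyGet? seq i with
    | some c => if c = '-' then false else pvFullA rest i
    | none => false

def get_core_indices (alignment : List (String × String)) : List Int :=
  let vals := (PySem.Dict.ofList alignment).values
  (PySem.List.pyRange 0 (pvLenFirstA vals) 1).foldl
    (fun indices i => if pvFullA vals i then indices ++ [i] else indices) []

-- ===== PORT B =====
-- n = len(seqs[0]); empty dict raises IndexError — excluded by Pre_ (0 there is arbitrary)
def pvLenFirstB (vals : List String) : Int :=
  match vals with | [] => 0 | s :: _ => PySem.Str.len s

-- the gapped set, built sequence-outer / column-inner
def pvGapped (vals : List String) (n : Int) : PySem.Set Int :=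
  vals.foldl (fun g seq =>
    (PySem.List.pyRange 0 n 1).foldl
      (fun g i => if (PySem.Str.pyGet? seq i).getD ' ' = '-' then PySem.Set.add g i else g) g)
    PySem.Set.empty

def get_core_indices_alt (alignment : List (String × String)) : List Int :=
  let vals := (PySem.Dict.ofList alignment).values
  let n := pvLenFirstB vals
  (PySem.List.pyRange 0 n 1).filter (fun i => !(PySem.Set.contains (pvGapped vals n) i))

-- ===== PRECONDITION & SPEC =====
-- Pre_ excludes the empty dict (A raises IndexError on list(values)[0]) and alignments in which
-- some sequence is shorter than the first one: there indexing seq[i] makes A raise IndexError on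
-- most such inputs, and B (which always scans every sequence over range(n)) raises on all of them.
def Pre_get_core_indices (alignment : List (String × String)) : Prop :=
  (PySem.Dict.ofList alignment).values ≠ [] ∧
  ∀ s ∈ (PySem.Dict.ofList alignment).values,
    PySem.Str.len ((PySem.Dict.ofList alignment).values).headI ≤ PySem.Str.len s
instance (alignment : List (String × String)) : Decidable (Pre_get_core_indices alignment) := by
  unfold Pre_get_core_indices; infer_instance

def pvWitness_get_core_indices : (List (String × String)) := [("x", "AB-C"), ("y", "A-BC")]

def Spec_get_core_indices (alignment : List (String × String)) (out : List Int) : Prop := out = get_core_indices_alt alignment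
instance (alignment : List (String × String)) (out : List Int) : Decidable (Spec_get_core_indices alignment out) := by unfold Spec_get_core_indices; infer_instance

-- ===== CLAIM (what is proved, stated in full; the proofs are below) =====
def Claim_equal_get_core_indices : Prop := ∀ (alignment : List (String × String)), Dom_get_core_indices alignment → Pre_get_core_indices alignment → Spec_get_core_indices alignment (get_core_indices alignment)

-- ===== LEMMAS AND PROOFS =====

-- an in-range string index yields a character
lemma pvStrGet_isSome (s : String) (i : Int) (h0 : 0 ≤ i) (h : i < (s.toList.length : Int)) :
    ∃ c, PySem.Str.pyGet? s i = some c := by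
  simp only [PySem.Str.pyGet?, PySem.Chars.pyGet?, PySem.List.pyGet?, PySem.List.pyIdx?]
  rw [if_pos h0, if_pos h]
  simp only [Option.bind_some]
  exact ⟨s.toList[i.toNat]'(by omega), List.getElem?_eq_getElem (by omega)⟩

-- membership in the inner fold of B: conditional Set.add over a list
lemma pvMemInner (l : List Int) (P : Int → Prop) [DecidablePred P] (g : PySem.Set Int) (x : Int) :
    x ∈ l.foldl (fun g i => if P i then PySem.Set.add g i else g) g ↔
      x ∈ g ∨ (x ∈ l ∧ P x) := by
  induction l generalizing g with
  | nil => simp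
  | cons a t ih =>
    simp only [List.foldl_cons, ih, List.mem_cons]
    split_ifs with hp
    · rw [PySem.Set.mem_add]
      constructor
      · rintro ((hg | rfl) | ht); exacts [Or.inl hg, Or.inr ⟨Or.inl rfl, hp⟩, Or.inr ⟨Or.inr ht.1, ht.2⟩]
      · rintro (hg | ⟨rfl | ht, hx⟩); exacts [Or.inl (Or.inl hg), Or.inl (Or.inr rfl), Or.inr ⟨ht, hx⟩]
    · constructor
      · rintro (hg | ht); exacts [Or.inl hg, Or.inr ⟨Or.inr ht.1, ht.2⟩]
      · rintro (hg | ⟨rfl | ht, hx⟩); exacts [Or.inl hg, absurd hx hp, Or.inr ⟨ht, hx⟩]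

-- membership in B's gapped set
lemma pvMemGapped (vals : List String) (n : Int) (x : Int) :
    x ∈ pvGapped vals n ↔
      x ∈ PySem.List.pyRange 0 n 1 ∧ ∃ seq ∈ vals, (PySem.Str.pyGet? seq x).getD ' ' = '-' := by
  unfold pvGapped
  suffices h : ∀ g : PySem.Set Int, x ∈ vals.foldl (fun g seq =>
        (PySem.List.pyRange 0 n 1).foldl
          (fun g i => if (PySem.Str.pyGet? seq i).getD ' ' = '-' then PySem.Set.add g i else g) g) g ↔
      x ∈ g ∨ (x ∈ PySem.List.pyRange 0 n 1 ∧ ∃ seq ∈ vals, (PySem.Str.pyGet? seq x).getD ' ' = '-') by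
    rw [h PySem.Set.empty]
    simp [PySem.Set.empty]
  induction vals with
  | nil => simp
  | cons s t ih =>
    intro g
    simp only [List.foldl_cons, ih, pvMemInner, List.mem_cons]
    constructor
    · rintro ((hg | ⟨hr, hp⟩) | ⟨hr, seq, hseq, hp⟩)
      exacts [Or.inl hg, Or.inr ⟨hr, s, Or.inl rfl, hp⟩, Or.inr ⟨hr, seq, Or.inr hseq, hp⟩]
    · rintro (hg | ⟨hr, seq, (rfl | hseq), hp⟩)
      exacts [Or.inl (Or.inl hg), Or.inl (Or.inr ⟨hr, hp⟩), Or.inr ⟨hr, seq, hseq, hp⟩]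

-- A's inner loop returns false iff some sequence carries '-' at i, when all indexings are in range
lemma pvFullA_eq_false_iff (vals : List String) (i : Int)
    (hin : ∀ s ∈ vals, ∃ c, PySem.Str.pyGet? s i = some c) :
    pvFullA vals i = false ↔ ∃ seq ∈ vals, (PySem.Str.pyGet? seq i).getD ' ' = '-' := by
  induction vals with
  | nil => simp [pvFullA]
  | cons s t ih =>
    obtain ⟨c, hc⟩ := hin s (List.mem_cons_self)
    have ih' := ih (fun s hs => hin s (List.mem_cons_of_mem _ hs))
    simp only [pvFullA, hc]
    by_cases hdash : c = '-'
    · subst hdash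
      rw [if_pos rfl]
      exact ⟨fun _ => ⟨s, List.mem_cons_self, by rw [hc]; rfl⟩, fun _ => rfl⟩
    · rw [if_neg hdash, ih']
      constructor
      · rintro ⟨seq, hseq, hp⟩; exact ⟨seq, List.mem_cons_of_mem _ hseq, hp⟩
      · rintro ⟨seq, hseq, hp⟩
        rcases List.mem_cons.mp hseq with rfl | hseq
        · rw [hc] at hp; simp only [Option.getD_some] at hp; exact absurd hp hdash
        · exact ⟨seq, hseq, hp⟩

-- the core equality, over the extracted values list
lemma pvMain (vals : List String) (hne : vals ≠ [])
    (hlen : ∀ s ∈ vals, PySem.Str.len vals.headI ≤ PySem.Str.len s) :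
    (PySem.List.pyRange 0 (pvLenFirstA vals) 1).foldl
        (fun indices i => if pvFullA vals i then indices ++ [i] else indices) [] =
      (PySem.List.pyRange 0 (pvLenFirstB vals) 1).filter
        (fun i => !(PySem.Set.contains (pvGapped vals (pvLenFirstB vals)) i)) := by
  have hBA : pvLenFirstB vals = pvLenFirstA vals := rfl
  rw [hBA]
  set n := pvLenFirstA vals with hn
  have hlens : ∀ s ∈ vals, n ≤ (s.toList.length : Int) := by
    intro s hs
    obtain ⟨s0, vrest, rfl⟩ := List.exists_cons_of_ne_nil hne
    have := hlen s hs
    simp only [List.headI] at this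
    rw [PySem.Str.len_eq, PySem.Str.len_eq] at this
    rw [hn]
    simp only [pvLenFirstA, PySem.Str.len_eq]
    exact_mod_cast this
  rw [PySem.List.foldl_append_if (pvFullA vals) (fun i => i)]
  simp only [List.nil_append, List.map_id']
  apply List.filter_congr
  intro i hi
  have hir : 0 ≤ i ∧ i < n := PySem.List.mem_pyRange_one.mp hi
  have hsome : ∀ s ∈ vals, ∃ c, PySem.Str.pyGet? s i = some c := by
    intro s hs
    exact pvStrGet_isSome s i hir.1 (lt_of_lt_of_le hir.2 (hlens s hs))
  rcases Bool.eq_false_or_eq_true (pvFullA vals i) with hf | hf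
  · rw [hf]
    have hct : PySem.Set.contains (pvGapped vals n) i = false := by
      rw [← Bool.not_eq_true, PySem.Set.contains_iff]
      intro hmem
      have hex := ((pvMemGapped vals n i).mp hmem).2
      have hff := (pvFullA_eq_false_iff vals i hsome).mpr hex
      rw [hf] at hff; exact absurd hff (by simp)
    rw [hct]; rfl
  · rw [hf]
    have hex : ∃ seq ∈ vals, (PySem.Str.pyGet? seq i).getD ' ' = '-' :=
      (pvFullA_eq_false_iff vals i hsome).mp hf
    have hct : PySem.Set.contains (pvGapped vals n) i = true := by
      rw [PySem.Set.contains_iff]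
      exact (pvMemGapped vals n i).mpr ⟨hi, hex⟩
    rw [hct]; rfl

-- ===== VERDICT (by name: the statement is the Claim_ definition above) =====
theorem get_core_indices_spec : Claim_equal_get_core_indices := by
  intro alignment _ hpre
  obtain ⟨hne, hlen⟩ := hpre
  unfold Spec_get_core_indices get_core_indices get_core_indices_alt
  exact pvMain _ hne hlen
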